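-- pv_equiv track=rewrite | github.com/piedpiperG/neuralnetwork | neuralnetwork/GCN GAT/master/Main_GCN2.py | build_cooccurrence_matrix
-- ===== SOURCE A (Python) =====
-- from collections import defaultdict
--
-- def build_cooccurrence_matrix(texts, vocab, window_size=4):
--     cooccurrence_counts = defaultdict(int)
--     for text in texts:
--         words = text.split()
--         for i, word in enumerate(words):
--             if word in vocab:
--                 start = max(0, i - window_size)
--                 end = min(len(words), i + window_size + 1)
--                 for j in range(start, end):
--                     if i != j and words[j] in vocab:
--                         pair = tuple(sorted([word, words[j]]))
--                         cooccurrence_counts[pair] += 1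
--     return cooccurrence_counts
-- ===== SOURCE B (Python) =====
-- from collections import defaultdict, Counter
--
-- def build_cooccurrence_matrix(texts, vocab, window_size=4):
--     # Staged: (1) enumerate every forward in-window vocab pair once as a flat
--     # list, (2) count it with Counter, (3) scale every count by 2 at the end
--     # (each unordered pair is tallied from both endpoints by the symmetric scan).
--     reach = max(window_size, 0)
--     pairs = [
--         tuple(sorted((w, x)))
--         for text in texts
--         for words in (text.split(),)
--         for i, w in enumerate(words)
--         if w in vocab
--         for x in words[i + 1 : i + 1 + reach]
--         if x in vocab
--     ]
--     counts = Counter(pairs)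
--     return defaultdict(int, {p: 2 * n for p, n in counts.items()})
-- ===== Notes on version B (the rewrite author's own statement) =====
-- stated objective: alternative
-- what changed: Replaced A's single-pass symmetric window scan that increments a defaultdict in place by a staged pipeline: one comprehension flattens every forward (j>i) in-window vocab pair into a flat list, Counter counts that list once, and a final pass doubles every count (the symmetric scan tallies each unordered pair from both endpoints); same keys, insertion order and counts.
import Mathlib
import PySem

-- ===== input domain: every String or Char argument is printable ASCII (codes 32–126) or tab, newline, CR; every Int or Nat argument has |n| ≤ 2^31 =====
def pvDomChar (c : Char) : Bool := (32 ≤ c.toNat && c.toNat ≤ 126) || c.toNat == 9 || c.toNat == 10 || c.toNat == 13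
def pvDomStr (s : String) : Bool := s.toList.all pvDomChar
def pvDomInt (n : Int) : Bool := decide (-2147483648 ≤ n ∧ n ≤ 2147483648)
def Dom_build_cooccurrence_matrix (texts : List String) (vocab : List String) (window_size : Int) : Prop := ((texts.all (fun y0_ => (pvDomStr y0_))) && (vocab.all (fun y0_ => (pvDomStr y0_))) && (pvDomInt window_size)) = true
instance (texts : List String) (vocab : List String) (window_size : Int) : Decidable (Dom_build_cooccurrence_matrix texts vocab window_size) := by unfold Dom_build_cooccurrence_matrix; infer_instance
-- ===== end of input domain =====

-- B replaces A's in-place symmetric-window counting loop by a staged pipeline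
-- (flatten forward in-window vocab pairs, Counter, double every count); proved to
-- return the same association list (keys, insertion order, counts).

-- tuple(sorted([a, b])) for two strings — exact: Python's sort of a 2-element list puts
-- the smaller (code-point lexicographic = Lean's String '<') first; used by both ports.
def pvPair (a b : String) : String × String := if b < a then (b, a) else (a, b)

-- ===== PORT A =====
def build_cooccurrence_matrix (texts : List String) (vocab : List String) (window_size : Int) : List (String × String × Int) :=
  let final := texts.foldl (fun d text =>
    let words := PySem.Str.split₀ text
    (PySem.List.enumerate words).foldl (fun d iw =>
      if iw.2 ∈ vocab then
        (PySem.List.pyRange (max 0 (iw.1 - window_size)) (min (PySem.List.len words) (iw.1 + window_size + 1)) 1).foldl (fun d j =>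
          if iw.1 ≠ j ∧ PySem.List.pyGetD words j "" ∈ vocab then
            d.modify (pvPair iw.2 (PySem.List.pyGetD words j "")) 0 (· + 1)
          else d) d
      else d) d) PySem.Dict.empty
  final.items.map (fun p => (p.1.1, p.1.2, p.2))

-- ===== PORT B =====
def build_cooccurrence_matrix_alt (texts : List String) (vocab : List String) (window_size : Int) : List (String × String × Int) :=
  let reach := max window_size 0
  let pairs := texts.flatMap (fun text =>
    let words := PySem.Str.split₀ text
    (PySem.List.enumerate words).flatMap (fun iw =>
      if iw.2 ∈ vocab then
        ((PySem.List.slice words (some (iw.1 + 1)) (some (iw.1 + 1 + reach))).filter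
            (fun x => decide (x ∈ vocab))).map (fun x => pvPair iw.2 x)
      else []))
  let counts := PySem.Dict.counter pairs
  counts.items.map (fun p => (p.1.1, p.1.2, 2 * p.2))

-- ===== PRECONDITION & SPEC =====
def Spec_build_cooccurrence_matrix (texts : List String) (vocab : List String) (window_size : Int) (out : List (String × String × Int)) : Prop := out = build_cooccurrence_matrix_alt texts vocab window_size
instance (texts : List String) (vocab : List String) (window_size : Int) (out : List (String × String × Int)) : Decidable (Spec_build_cooccurrence_matrix texts vocab window_size out) := by unfold Spec_build_cooccurrence_matrix; infer_instance

-- ===== CLAIM (what is proved, stated in full; the proofs are below) =====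
def Claim_equal_build_cooccurrence_matrix : Prop := ∀ (texts : List String) (vocab : List String) (window_size : Int), Dom_build_cooccurrence_matrix texts vocab window_size → Spec_build_cooccurrence_matrix texts vocab window_size (build_cooccurrence_matrix texts vocab window_size)

-- ===== LEMMAS AND PROOFS =====

def pvWd (words : List String) (j : Int) : String := PySem.List.pyGetD words j ""

-- the per-index key lists A touches (full window minus i) and B touches (forward half)
def pvKeysA (vocab : List String) (ws : Int) (words : List String) (i : Int) : List (String × String) :=
  ((PySem.List.pyRange (max 0 (i - ws)) (min (PySem.List.len words) (i + ws + 1)) 1).filter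
      (fun j => decide (pvWd words i ∈ vocab) && decide (i ≠ j) && decide (pvWd words j ∈ vocab))).map
    (fun j => pvPair (pvWd words i) (pvWd words j))

def pvKeysB (vocab : List String) (ws : Int) (words : List String) (i : Int) : List (String × String) :=
  ((PySem.List.pyRange (i + 1) (min (PySem.List.len words) (i + ws + 1)) 1).filter
      (fun j => decide (pvWd words i ∈ vocab) && decide (pvWd words j ∈ vocab))).map
    (fun j => pvPair (pvWd words i) (pvWd words j))

def pvLo (vocab : List String) (ws : Int) (words : List String) (i : Int) : List (String × String) :=
  ((PySem.List.pyRange (max 0 (i - ws)) (min i (min (PySem.List.len words) (i + ws + 1))) 1).filter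
      (fun j => decide (pvWd words i ∈ vocab) && decide (i ≠ j) && decide (pvWd words j ∈ vocab))).map
    (fun j => pvPair (pvWd words i) (pvWd words j))

def pvKA1 (vocab : List String) (ws : Int) (words : List String) : List (String × String) :=
  (PySem.List.pyRange 0 (PySem.List.len words) 1).flatMap (pvKeysA vocab ws words)

def pvKB1 (vocab : List String) (ws : Int) (words : List String) : List (String × String) :=
  (PySem.List.pyRange 0 (PySem.List.len words) 1).flatMap (pvKeysB vocab ws words)

def pvKA (vocab : List String) (ws : Int) (texts : List String) : List (String × String) :=
  texts.flatMap (fun t => pvKA1 vocab ws (PySem.Str.split₀ t))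

def pvKB (vocab : List String) (ws : Int) (texts : List String) : List (String × String) :=
  texts.flatMap (fun t => pvKB1 vocab ws (PySem.Str.split₀ t))

def pvBump (d : PySem.Dict (String × String) Int) (L : List (String × String)) : PySem.Dict (String × String) Int :=
  L.foldl (fun d x => d.modify x 0 (· + 1)) d

-- pvPair is symmetric
theorem pvPair_comm (a b : String) : pvPair a b = pvPair b a := by
  unfold pvPair
  rcases lt_trichotomy a b with h | h | h
  · rw [if_neg (asymm h), if_pos h]
  · simp [h]
  · rw [if_pos h, if_neg (asymm h)]

-- A's loop body over one text equals the bump-1 fold over pvKA1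
theorem stepA_eq (vocab : List String) (ws : Int) (words : List String) (d : PySem.Dict (String × String) Int) :
    (PySem.List.enumerate words).foldl (fun d iw =>
      if iw.2 ∈ vocab then
        (PySem.List.pyRange (max 0 (iw.1 - ws)) (min (PySem.List.len words) (iw.1 + ws + 1)) 1).foldl (fun d j =>
          if iw.1 ≠ j ∧ PySem.List.pyGetD words j "" ∈ vocab then
            d.modify (pvPair iw.2 (PySem.List.pyGetD words j "")) 0 (· + 1)
          else d) d
      else d) d = pvBump d (pvKA1 vocab ws words) := by
  rw [PySem.List.enumerate_eq_map_pyRange words "", List.foldl_map]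
  unfold pvKA1 pvBump
  rw [List.foldl_flatMap]
  apply PySem.List.foldl_congr_mem
  intro d i _hmem
  unfold pvKeysA pvWd
  rw [List.foldl_map]
  by_cases hv : PySem.List.pyGetD words i "" ∈ vocab
  · rw [if_pos hv,
      PySem.List.foldl_ite_eq_foldl_filter (p := fun j => i ≠ j ∧ PySem.List.pyGetD words j "" ∈ vocab)]
    congr 1
    refine List.filter_congr ?_
    intro j _
    simp [hv]
  · rw [if_neg hv]
    have hnil : (PySem.List.pyRange (max 0 (i - ws)) (min (PySem.List.len words) (i + ws + 1)) 1).filter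
        (fun j => decide (PySem.List.pyGetD words i "" ∈ vocab) && decide (i ≠ j) &&
          decide (PySem.List.pyGetD words j "" ∈ vocab)) = [] := by
      simp [hv]
    rw [hnil]
    rfl

-- the whole of A's dictionary is the counter of the concatenated key list
theorem A_eq_counter (vocab : List String) (ws : Int) :
    ∀ (texts : List String) (d : PySem.Dict (String × String) Int),
      texts.foldl (fun d text =>
        (PySem.List.enumerate (PySem.Str.split₀ text)).foldl (fun d iw =>
          if iw.2 ∈ vocab then
            (PySem.List.pyRange (max 0 (iw.1 - ws)) (min (PySem.List.len (PySem.Str.split₀ text)) (iw.1 + ws + 1)) 1).foldl (fun d j =>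
              if iw.1 ≠ j ∧ PySem.List.pyGetD (PySem.Str.split₀ text) j "" ∈ vocab then
                d.modify (pvPair iw.2 (PySem.List.pyGetD (PySem.Str.split₀ text) j "")) 0 (· + 1)
              else d) d
          else d) d) d = pvBump d (pvKA vocab ws texts) := by
  intro texts
  induction texts with
  | nil => intro d; rfl
  | cons t ts ih =>
      intro d
      simp only [List.foldl_cons]
      rw [stepA_eq vocab ws (PySem.Str.split₀ t) d, ih]
      unfold pvKA pvBump
      rw [List.flatMap_cons, List.foldl_append]

-- the slice of words starting behind i is the windowed index range, read off words
theorem slice_eq_map_range (words : List String) (a r : Int) (h0 : 0 ≤ a) (hr : 0 ≤ r) :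
    PySem.List.slice words (some a) (some (a + r))
      = (PySem.List.pyRange a (min (PySem.List.len words) (a + r)) 1).map (fun j => pvWd words j) := by
  rw [PySem.List.slice_toNat words h0 (by omega)]
  have ht : (a + r).toNat - a.toNat = r.toNat := by omega
  rw [ht, PySem.List.len_eq]
  by_cases hc : a + r ≤ (words.length : Int)
  · rw [min_eq_right hc]
    have hsplit : PySem.List.pyRange a (words.length : Int) 1
        = PySem.List.pyRange a (a + r) 1 ++ PySem.List.pyRange (a + r) (words.length : Int) 1 := by
      by_cases ha : a ≤ (words.length : Int)
      · exact PySem.List.pyRange_one_append a (a + r) (words.length : Int) (by omega) hc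
      · omega
    have hdrop : words.drop a.toNat
        = (PySem.List.pyRange a (words.length : Int) 1).map (fun j => pvWd words j) := by
      unfold pvWd
      rw [PySem.List.map_pyGetD_pyRange' words "" h0]
    rw [hdrop, hsplit, List.map_append, List.take_append_of_le_length (by
      rw [List.length_map, PySem.List.length_pyRange_one]; omega)]
    rw [List.take_of_length_le (by rw [List.length_map, PySem.List.length_pyRange_one]; omega)]
  · rw [min_eq_left (by omega)]
    have hdrop : words.drop a.toNat
        = (PySem.List.pyRange a (words.length : Int) 1).map (fun j => pvWd words j) := by
      unfold pvWd
      rw [PySem.List.map_pyGetD_pyRange' words "" h0]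
    rw [hdrop, List.take_of_length_le (by rw [List.length_map, PySem.List.length_pyRange_one]; omega)]

-- B's per-index pair comprehension is exactly pvKeysB
theorem B_inner_eq (vocab : List String) (ws : Int) (words : List String) (i : Int) (h0 : 0 ≤ i) :
    (if pvWd words i ∈ vocab then
        ((PySem.List.slice words (some (i + 1)) (some (i + 1 + max ws 0))).filter
            (fun x => decide (x ∈ vocab))).map (fun x => pvPair (pvWd words i) x)
      else []) = pvKeysB vocab ws words i := by
  by_cases hv : pvWd words i ∈ vocab
  · rw [if_pos hv, slice_eq_map_range words (i + 1) (max ws 0) (by omega) (by omega),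
      List.filter_map, List.map_map]
    unfold pvKeysB
    have hrange : PySem.List.pyRange (i + 1) (min (PySem.List.len words) (i + 1 + max ws 0)) 1
        = PySem.List.pyRange (i + 1) (min (PySem.List.len words) (i + ws + 1)) 1 := by
      by_cases hw : 0 ≤ ws
      · rw [max_eq_left hw]
        congr 1
        omega
      · rw [PySem.List.pyRange_one_eq_nil (by rw [max_eq_right (by omega)]; omega),
          PySem.List.pyRange_one_eq_nil (by rw [PySem.List.len_eq]; omega)]
    rw [hrange]
    congr 1
    refine List.filter_congr ?_
    intro j _
    simp [Function.comp, hv]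
  · rw [if_neg hv]
    unfold pvKeysB
    have hnil : (PySem.List.pyRange (i + 1) (min (PySem.List.len words) (i + ws + 1)) 1).filter
        (fun j => decide (pvWd words i ∈ vocab) && decide (pvWd words j ∈ vocab)) = [] := by
      simp [hv]
    rw [hnil]
    rfl

-- B's flattened pair list is exactly pvKB
theorem B_pairs_eq (vocab : List String) (ws : Int) (texts : List String) :
    texts.flatMap (fun text =>
      (PySem.List.enumerate (PySem.Str.split₀ text)).flatMap (fun iw =>
        if iw.2 ∈ vocab then
          ((PySem.List.slice (PySem.Str.split₀ text) (some (iw.1 + 1)) (some (iw.1 + 1 + max ws 0))).filter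
              (fun x => decide (x ∈ vocab))).map (fun x => pvPair iw.2 x)
        else [])) = pvKB vocab ws texts := by
  unfold pvKB
  refine List.flatMap_congr ?_
  intro t _
  set words := PySem.Str.split₀ t with hw
  rw [PySem.List.enumerate_eq_map_pyRange words "", List.flatMap_map]
  unfold pvKB1
  refine List.flatMap_congr ?_
  intro i hi
  have h0 : 0 ≤ i := (PySem.List.mem_pyRange_one.mp hi).1
  exact B_inner_eq vocab ws words i h0

-- keysA splits into the backward (Lo) and forward (= keysB) half
theorem keysA_split (vocab : List String) (ws : Int) (words : List String) (i : Int)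
    (h0 : 0 ≤ i) (hn : i < (words.length : Int)) :
    pvKeysA vocab ws words i = pvLo vocab ws words i ++ pvKeysB vocab ws words i := by
  unfold pvKeysA pvLo pvKeysB
  simp only [PySem.List.len_eq]
  by_cases hws : 0 ≤ ws
  · have ha : max 0 (i - ws) ≤ i := by omega
    have hb : i ≤ min (words.length : Int) (i + ws + 1) := by omega
    have hib : i < min (words.length : Int) (i + ws + 1) := by omega
    rw [PySem.List.pyRange_one_append (max 0 (i - ws)) i (min (words.length : Int) (i + ws + 1)) ha hb,
      List.filter_append, List.map_append]
    congr 1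
    · rw [min_eq_left hb]
    · rw [PySem.List.pyRange_one_cons hib, List.filter_cons]
      have hz : (decide (pvWd words i ∈ vocab) && decide (i ≠ i) && decide (pvWd words i ∈ vocab)) = false := by
        simp
      rw [hz]
      simp only [Bool.false_eq_true, if_false]
      congr 1
      refine List.filter_congr ?_
      intro j hj
      have hij : i ≠ j := by
        have := PySem.List.mem_pyRange_one.mp hj
        omega
      simp [hij]
  · have e1 : PySem.List.pyRange (max 0 (i - ws)) (min (words.length : Int) (i + ws + 1)) 1 = [] :=
      PySem.List.pyRange_one_eq_nil (by omega)
    have e2 : PySem.List.pyRange (max 0 (i - ws)) (min i (min (words.length : Int) (i + ws + 1))) 1 = [] :=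
      PySem.List.pyRange_one_eq_nil (by omega)
    have e3 : PySem.List.pyRange (i + 1) (min (words.length : Int) (i + ws + 1)) 1 = [] :=
      PySem.List.pyRange_one_eq_nil (by omega)
    rw [e1, e2, e3]
    simp

-- every element of Lo i occurs in some earlier keysB j (the swap (i,j) ↦ (j,i))
theorem lo_subset (vocab : List String) (ws : Int) (words : List String) (i : Int)
    (h0 : 0 ≤ i) (hn : i < (words.length : Int)) :
    ∀ x ∈ pvLo vocab ws words i, ∃ j, 0 ≤ j ∧ j < i ∧ x ∈ pvKeysB vocab ws words j := by
  intro x hx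
  unfold pvLo at hx
  rw [List.mem_map] at hx
  obtain ⟨j, hj, hpair⟩ := hx
  rw [List.mem_filter] at hj
  obtain ⟨hjr, hq⟩ := hj
  have hjb := PySem.List.mem_pyRange_one.mp hjr
  simp only [Bool.and_eq_true, decide_eq_true_eq] at hq
  obtain ⟨⟨hvi, hne⟩, hvj⟩ := hq
  refine ⟨j, by omega, by omega, ?_⟩
  unfold pvKeysB
  rw [List.mem_map]
  refine ⟨i, ?_, ?_⟩
  · rw [List.mem_filter]
    constructor
    · rw [PySem.List.len_eq, PySem.List.mem_pyRange_one]
      omega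
    · simp [hvi, hvj]
  · rw [← hpair, pvPair_comm]

-- Set.update absorbs elements already present
theorem update_eq_self_of_mem {s : PySem.Set (String × String)} {xs : List (String × String)}
    (h : ∀ x ∈ xs, x ∈ s) : PySem.Set.update s xs = s := by
  induction xs generalizing s with
  | nil => rfl
  | cons x t ih =>
      have hx : x ∈ s := h x (by simp)
      have : PySem.Set.add s x = s := by
        simp [PySem.Set.add, hx]
      simp only [PySem.Set.update, List.foldl_cons, this]
      exact ih (fun y hy => h y (by simp [hy]))

-- updating a key set by A's keys over a prefix of indices equals updating by B's
theorem update_aux (vocab : List String) (ws : Int) (words : List String) :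
    ∀ (t : ℕ), (t : Int) ≤ (words.length : Int) → ∀ (s : PySem.Set (String × String)),
      PySem.Set.update s ((PySem.List.pyRange 0 (t : Int) 1).flatMap (pvKeysA vocab ws words))
        = PySem.Set.update s ((PySem.List.pyRange 0 (t : Int) 1).flatMap (pvKeysB vocab ws words)) := by
  intro t
  induction t with
  | zero =>
      intro _ s
      rw [PySem.List.pyRange_one_eq_nil (by omega)]
      rfl
  | succ t ih =>
      intro ht s
      have hc : ((t + 1 : ℕ) : Int) = (t : Int) + 1 := by omega
      rw [hc, PySem.List.pyRange_one_succ_right (by omega), List.flatMap_append, List.flatMap_append,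
        PySem.Set.update_append, PySem.Set.update_append, ih (by omega) s,
        List.flatMap_singleton, List.flatMap_singleton]
      have h0 : (0 : Int) ≤ (t : Int) := by omega
      have hn : (t : Int) < (words.length : Int) := by omega
      rw [keysA_split vocab ws words t h0 hn, PySem.Set.update_append]
      congr 1
      apply update_eq_self_of_mem
      intro x hx
      obtain ⟨j, hj0, hjt, hxm⟩ := lo_subset vocab ws words t h0 hn x hx
      rw [PySem.Set.mem_update]
      right
      rw [List.mem_flatMap]
      exact ⟨j, PySem.List.mem_pyRange_one.mpr ⟨hj0, hjt⟩, hxm⟩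

-- per text: update by pvKA1 = update by pvKB1
theorem update_KA1_KB1 (vocab : List String) (ws : Int) (words : List String) (s : PySem.Set (String × String)) :
    PySem.Set.update s (pvKA1 vocab ws words) = PySem.Set.update s (pvKB1 vocab ws words) := by
  unfold pvKA1 pvKB1
  rw [PySem.List.len_eq]
  exact update_aux vocab ws words words.length (le_refl _) s

-- globally: update by pvKA = update by pvKB; in particular the key sets agree
theorem update_KA_KB (vocab : List String) (ws : Int) :
    ∀ (texts : List String) (s : PySem.Set (String × String)),
      PySem.Set.update s (pvKA vocab ws texts) = PySem.Set.update s (pvKB vocab ws texts) := by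
  intro texts
  induction texts with
  | nil => intro s; rfl
  | cons t ts ih =>
      intro s
      unfold pvKA pvKB
      rw [List.flatMap_cons, List.flatMap_cons, PySem.Set.update_append, PySem.Set.update_append,
        update_KA1_KB1]
      exact ih _

theorem ofList_KA_KB (vocab : List String) (ws : Int) (texts : List String) :
    PySem.Set.ofList (pvKA vocab ws texts) = PySem.Set.ofList (pvKB vocab ws texts) := by
  rw [← PySem.Set.update_empty, ← PySem.Set.update_empty]
  exact update_KA_KB vocab ws texts PySem.Set.empty

-- countP as a 0/1 sum (Nat-valued)
theorem pv_countP_sum {α : Type} (p : α → Bool) (l : List α) :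
    l.countP p = (l.map (fun x => if p x = true then (1 : ℕ) else 0)).sum := by
  induction l with
  | nil => simp
  | cons x t ih => simp [List.countP_cons, ih]; omega

-- count distributes over flatMap
theorem pv_count_flatMap {α β : Type} [BEq α] (l : List β) (f : β → List α) (k : α) :
    (l.flatMap f).count k = (l.map (fun x => (f x).count k)).sum := by
  induction l with
  | nil => simp
  | cons x t ih => simp [List.count_append, ih]

-- a countP over a subrange [a,b) of ints equals a countP over [0,n) with the bounds as a conjunct
theorem pv_countP_subrange (P : Int → Bool) (a b n : ℤ) (h0 : 0 ≤ a) (hb : b ≤ n) :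
    (PySem.List.pyRange a b 1).countP P
      = (PySem.List.pyRange 0 n 1).countP (fun x => decide (a ≤ x ∧ x < b) && P x) := by
  by_cases hab : b ≤ a
  · rw [PySem.List.pyRange_one_eq_nil hab, List.countP_nil]
    symm
    rw [List.countP_eq_zero]
    intro x _
    simp only [Bool.and_eq_true, decide_eq_true_eq, not_and]
    intro h
    omega
  · have han : a ≤ n := by omega
    rw [PySem.List.pyRange_one_append 0 a n h0 han,
        PySem.List.pyRange_one_append a b n (by omega) hb,
        List.countP_append, List.countP_append]
    have z1 : (PySem.List.pyRange 0 a 1).countP (fun x => decide (a ≤ x ∧ x < b) && P x) = 0 := by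
      rw [List.countP_eq_zero]
      intro x hx
      have := PySem.List.mem_pyRange_one.mp hx
      simp only [Bool.and_eq_true, decide_eq_true_eq, not_and]
      intro h
      omega
    have z2 : (PySem.List.pyRange b n 1).countP (fun x => decide (a ≤ x ∧ x < b) && P x) = 0 := by
      rw [List.countP_eq_zero]
      intro x hx
      have := PySem.List.mem_pyRange_one.mp hx
      simp only [Bool.and_eq_true, decide_eq_true_eq, not_and]
      intro h
      omega
    have zm : (PySem.List.pyRange a b 1).countP (fun x => decide (a ≤ x ∧ x < b) && P x)
        = (PySem.List.pyRange a b 1).countP P := by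
      refine List.countP_congr ?_
      intro x hx
      have := PySem.List.mem_pyRange_one.mp hx
      simp only [Bool.and_eq_true, decide_eq_true_eq]
      constructor
      · rintro ⟨-, h⟩; exact h
      · intro h; exact ⟨by omega, h⟩
    rw [z1, z2, zm]
    omega

-- double counting over the square: a symmetric, diagonal-free table summed fully is twice its
-- strict upper triangle
theorem pv_sumsq (f : ℕ → ℕ → ℕ) (hs : ∀ i j, f i j = f j i) (hd : ∀ i, f i i = 0) :
    ∀ (m : ℕ),
      ((List.range m).map (fun i => ((List.range m).map (fun j => f i j)).sum)).sum
        = 2 * ((List.range m).map (fun i => ((List.range m).map (fun j => if i < j then f i j else 0)).sum)).sum := by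
  intro m
  induction m with
  | zero => simp
  | succ m ih =>
      rw [List.range_succ]
      simp only [List.map_append, List.sum_append, List.map_cons, List.map_nil, List.sum_cons,
        List.sum_nil, Nat.add_zero]
      rw [List.sum_map_add, List.sum_map_add]
      have e1 : ((List.range m).map (fun i => if i < m then f i m else 0)).sum
          = ((List.range m).map (fun i => f i m)).sum := by
        refine congrArg List.sum (List.map_congr_left ?_)
        intro i hi
        rw [List.mem_range] at hi
        rw [if_pos hi]
      have e2 : ((List.range m).map (fun j => if m < j then f m j else 0)).sum = 0 := by
        have : ((List.range m).map (fun j => if m < j then f m j else 0))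
            = (List.range m).map (fun _ => 0) := by
          refine List.map_congr_left ?_
          intro j hj
          rw [List.mem_range] at hj
          rw [if_neg (by omega)]
        rw [this]
        simp
      have e3 : ((List.range m).map (fun j => f m j)).sum = ((List.range m).map (fun j => f j m)).sum := by
        refine congrArg List.sum (List.map_congr_left ?_)
        intro j _
        exact hs m j
      rw [e1, e2, e3, hd m, ih, if_neg (Nat.lt_irrefl m)]
      omega

-- the decidable per-pair condition both counters measure
def pvG (vocab : List String) (ws : Int) (words : List String) (k : String × String) (i j : ℕ) : Bool :=
  decide (i ≠ j ∧ (i : ℤ) - ws ≤ (j : ℤ) ∧ (j : ℤ) ≤ (i : ℤ) + ws ∧ pvWd words (i : ℤ) ∈ vocab ∧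
    pvWd words (j : ℤ) ∈ vocab ∧ pvPair (pvWd words (i : ℤ)) (pvWd words (j : ℤ)) = k)

theorem countA_eq (vocab : List String) (ws : Int) (words : List String) (k : String × String)
    (i : ℕ) :
    (pvKeysA vocab ws words (i : ℤ)).count k
      = ((List.range words.length).map (fun j => if pvG vocab ws words k i j = true then (1 : ℕ) else 0)).sum := by
  unfold pvKeysA
  rw [List.count_eq_countP, List.countP_map, List.countP_filter,
    pv_countP_subrange _ (max 0 ((i : ℤ) - ws)) (min (PySem.List.len words) ((i : ℤ) + ws + 1))
      (words.length : ℤ) (by omega) (by rw [PySem.List.len_eq]; omega),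
    PySem.List.pyRange_zero_nat, List.countP_map]
  rw [pv_countP_sum]
  refine congrArg List.sum (List.map_congr_left ?_)
  intro j hj
  rw [List.mem_range] at hj
  simp only [Function.comp_apply, Bool.and_eq_true, decide_eq_true_eq, beq_iff_eq,
    PySem.List.len_eq, pvG]
  refine if_congr ?_ rfl rfl
  constructor
  · rintro ⟨⟨h1, h2⟩, hp, ⟨hvi, hne⟩, hvj⟩
    exact ⟨by omega, by omega, by omega, hvi, hvj, hp⟩
  · rintro ⟨hne, h1, h2, hvi, hvj, hp⟩
    exact ⟨⟨by omega, by omega⟩, hp, ⟨hvi, by omega⟩, hvj⟩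

theorem countB_eq (vocab : List String) (ws : Int) (words : List String) (k : String × String)
    (i : ℕ) :
    (pvKeysB vocab ws words (i : ℤ)).count k
      = ((List.range words.length).map (fun j => if i < j then (if pvG vocab ws words k i j = true then (1 : ℕ) else 0) else 0)).sum := by
  unfold pvKeysB
  rw [List.count_eq_countP, List.countP_map, List.countP_filter,
    pv_countP_subrange _ ((i : ℤ) + 1) (min (PySem.List.len words) ((i : ℤ) + ws + 1))
      (words.length : ℤ) (by omega) (by rw [PySem.List.len_eq]; omega),
    PySem.List.pyRange_zero_nat, List.countP_map]
  rw [pv_countP_sum]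
  refine congrArg List.sum (List.map_congr_left ?_)
  intro j hj
  rw [List.mem_range] at hj
  simp only [Function.comp_apply, Bool.and_eq_true, decide_eq_true_eq, beq_iff_eq,
    PySem.List.len_eq, pvG]
  by_cases hlt : i < j
  · rw [if_pos hlt]
    refine if_congr ?_ rfl rfl
    constructor
    · rintro ⟨⟨h1, h2⟩, hp, hvi, hvj⟩
      exact ⟨by omega, by omega, by omega, hvi, hvj, hp⟩
    · rintro ⟨hne, h1, h2, hvi, hvj, hp⟩
      exact ⟨⟨by omega, by omega⟩, hp, hvi, hvj⟩
  · rw [if_neg hlt, if_neg ?_]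
    rintro ⟨⟨h1, h2⟩, -, -, -⟩
    omega

-- per text: each key occurs in pvKA1 exactly twice as often as in pvKB1
theorem count_KA1_KB1 (vocab : List String) (ws : Int) (words : List String) (k : String × String) :
    (pvKA1 vocab ws words).count k = 2 * (pvKB1 vocab ws words).count k := by
  unfold pvKA1 pvKB1
  rw [pv_count_flatMap, pv_count_flatMap, PySem.List.len_eq, PySem.List.pyRange_zero_nat,
    List.map_map, List.map_map]
  show (List.map (fun n : ℕ => List.count k (pvKeysA vocab ws words (n : ℤ))) (List.range words.length)).sum
      = 2 * (List.map (fun n : ℕ => List.count k (pvKeysB vocab ws words (n : ℤ))) (List.range words.length)).sum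
  have eA : (List.map (fun n : ℕ => List.count k (pvKeysA vocab ws words (n : ℤ))) (List.range words.length)).sum
      = ((List.range words.length).map (fun i => ((List.range words.length).map (fun j => if pvG vocab ws words k i j = true then (1 : ℕ) else 0)).sum)).sum := by
    refine congrArg List.sum (List.map_congr_left ?_)
    intro i _
    exact countA_eq vocab ws words k i
  have eB : (List.map (fun n : ℕ => List.count k (pvKeysB vocab ws words (n : ℤ))) (List.range words.length)).sum
      = ((List.range words.length).map (fun i => ((List.range words.length).map (fun j => if i < j then (if pvG vocab ws words k i j = true then (1 : ℕ) else 0) else 0)).sum)).sum := by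
    refine congrArg List.sum (List.map_congr_left ?_)
    intro i _
    exact countB_eq vocab ws words k i
  rw [eA, eB]
  refine pv_sumsq (fun i j => if pvG vocab ws words k i j = true then (1 : ℕ) else 0) ?_ ?_ words.length
  · intro i j
    have hiff : pvG vocab ws words k i j = true ↔ pvG vocab ws words k j i = true := by
      simp only [pvG, decide_eq_true_eq]
      rw [pvPair_comm]
      constructor
      · rintro ⟨hne, h1, h2, hvi, hvj, hp⟩
        exact ⟨Ne.symm hne, by omega, by omega, hvj, hvi, hp⟩
      · rintro ⟨hne, h1, h2, hvj, hvi, hp⟩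
        exact ⟨Ne.symm hne, by omega, by omega, hvi, hvj, hp⟩
    by_cases hg : pvG vocab ws words k i j = true
    · simp only []
      rw [if_pos hg, if_pos (hiff.mp hg)]
    · simp only []
      rw [if_neg hg, if_neg (fun h => hg (hiff.mpr h))]
  · intro i
    have hz : pvG vocab ws words k i i = false := by
      simp [pvG]
    simp only []
    rw [hz]
    simp

-- globally: each key occurs in pvKA exactly twice as often as in pvKB
theorem count_KA_KB (vocab : List String) (ws : Int) (texts : List String) (k : String × String) :
    (pvKA vocab ws texts).count k = 2 * (pvKB vocab ws texts).count k := by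
  induction texts with
  | nil => rfl
  | cons t ts ih =>
      unfold pvKA pvKB
      rw [List.flatMap_cons, List.flatMap_cons, List.count_append, List.count_append]
      unfold pvKA pvKB at ih
      rw [ih, count_KA1_KB1]
      ring

-- ===== VERDICT (by name: the statement is the Claim_ definition above) =====
theorem build_cooccurrence_matrix_spec : Claim_equal_build_cooccurrence_matrix := by
  intro texts vocab ws _
  unfold Spec_build_cooccurrence_matrix
  simp only [build_cooccurrence_matrix, build_cooccurrence_matrix_alt]
  rw [A_eq_counter vocab ws texts PySem.Dict.empty, B_pairs_eq vocab ws texts]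
  have hA : pvBump PySem.Dict.empty (pvKA vocab ws texts) = PySem.Dict.counter (pvKA vocab ws texts) := rfl
  rw [hA, PySem.Dict.items_counter, PySem.Dict.items_counter, ofList_KA_KB, List.map_map, List.map_map]
  refine List.map_congr_left ?_
  intro k _
  simp only [Function.comp_apply]
  rw [count_KA_KB vocab ws texts k]
  push_cast
  ring_nf
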